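-- pv_equiv track=rewrite | github.com/bekerov/bunny_ai | cs373_hw3.py | A_fn
-- ===== SOURCE A (Python) =====
-- S = [(1,2), (1,3), (2,1), (2,2), (2,3), (2,4), (3,1), (3,2), (3,3), (3,4)]
--
-- def terminal(s):
--     return s == (1,2) or s == (1,3) or s == (2,4)
--
-- def A_fn(s):
--     if terminal(s):
--         return []
--     #Can move in any direction provided it goes into a legal state
--     moves = [(0,1), (0,-1), (1,0), (-1,0)]
--     valid = []
--     for move in moves:
--         result = (s[0] + move[0], s[1] + move[1])
--         #moves into legal state
--         if result in S:
--             valid.append(move)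
--     return valid
-- ===== SOURCE B (Python) =====
-- S = [(1,2), (1,3), (2,1), (2,2), (2,3), (2,4), (3,1), (3,2), (3,3), (3,4)]
--
-- _TERMINALS = [(1,2), (1,3), (2,4)]
-- _MOVES = [(0,1), (0,-1), (1,0), (-1,0)]
--
-- # Precomputed table: every state of the 5x6 bounding box of the grid mapped to
-- # its valid moves; terminal states map to [].  States outside the box have no
-- # neighbour in S, so the .get default [] is exact.
-- ACTIONS = {}
-- for r in range(0, 5):
--     for c in range(0, 6):
--         st = (r, c)
--         if st in _TERMINALS:
--             ACTIONS[st] = []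
--         else:
--             ACTIONS[st] = [m for m in _MOVES if (r + m[0], c + m[1]) in S]
--
-- def A_fn(s):
--     return ACTIONS.get(s, [])
-- ===== Notes on version B (the rewrite author's own statement) =====
-- stated objective: alternative
-- what changed: B precomputes once, at module load, a dict ACTIONS mapping every state of the grid's bounding box to its valid-move list (terminals to []), so each call is a single dict lookup instead of a terminal check plus a scan of the four moves with a membership test in S.
import Mathlib
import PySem

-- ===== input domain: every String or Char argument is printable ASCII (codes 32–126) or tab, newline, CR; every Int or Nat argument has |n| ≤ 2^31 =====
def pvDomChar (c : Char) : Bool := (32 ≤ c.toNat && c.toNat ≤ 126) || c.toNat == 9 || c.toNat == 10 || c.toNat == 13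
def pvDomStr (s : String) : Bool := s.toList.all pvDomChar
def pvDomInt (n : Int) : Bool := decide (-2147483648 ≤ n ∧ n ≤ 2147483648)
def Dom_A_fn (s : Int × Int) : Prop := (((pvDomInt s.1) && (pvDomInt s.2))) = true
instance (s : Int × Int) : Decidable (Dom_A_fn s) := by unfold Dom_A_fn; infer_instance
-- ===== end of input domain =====

-- B replaces A's per-call scan over the four moves by a dict ACTIONS precomputed
-- once over the grid's bounding box; each call is then a single lookup (objective: alternative).

-- ===== PORT A =====
-- module-level S
def pySgrid : List (Int × Int) :=
  [(1,2), (1,3), (2,1), (2,2), (2,3), (2,4), (3,1), (3,2), (3,3), (3,4)]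

def terminal (s : Int × Int) : Bool :=
  s == (1,2) || s == (1,3) || s == (2,4)

def A_fn (s : Int × Int) : List (Int × Int) :=
  if terminal s then []
  else
    let moves : List (Int × Int) := [(0,1), (0,-1), (1,0), (-1,0)]
    moves.foldl (fun valid move =>
      let result := (s.1 + move.1, s.2 + move.2)
      if pySgrid.contains result then valid ++ [move] else valid) []

-- ===== PORT B =====
def pyTerminals : List (Int × Int) := [(1,2), (1,3), (2,4)]
def pyMoves : List (Int × Int) := [(0,1), (0,-1), (1,0), (-1,0)]

-- ACTIONS, built once by the module-level double loop of Source B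
def pyActions : PySem.Dict (Int × Int) (List (Int × Int)) :=
  (PySem.List.pyRange 0 5 1).foldl (fun d r =>
    (PySem.List.pyRange 0 6 1).foldl (fun d c =>
      let st := (r, c)
      if pyTerminals.contains st then d.insert st []
      else d.insert st (pyMoves.filter (fun m => pySgrid.contains (r + m.1, c + m.2)))) d)
    PySem.Dict.empty

def A_fn_alt (s : Int × Int) : List (Int × Int) :=
  pyActions.getD s []

-- ===== PRECONDITION & SPEC =====
def Spec_A_fn (s : Int × Int) (out : List (Int × Int)) : Prop := out = A_fn_alt s
instance (s : Int × Int) (out : List (Int × Int)) : Decidable (Spec_A_fn s out) := by unfold Spec_A_fn; infer_instance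

-- ===== CLAIM (what is proved, stated in full; the proofs are below) =====
def Claim_equal_A_fn : Prop := ∀ (s : Int × Int), Dom_A_fn s → Spec_A_fn s (A_fn s)

-- ===== LEMMAS AND PROOFS =====

-- Outside the 5x6 bounding box both programs return [].
lemma A_fn_outside (a b : Int) (h : ¬ (0 ≤ a ∧ a ≤ 4 ∧ 0 ≤ b ∧ b ≤ 5)) :
    A_fn (a, b) = [] := by
  have ht : terminal (a, b) = false := by
    simp only [terminal, Bool.or_eq_false_iff, beq_eq_false_iff_ne, ne_eq, Prod.mk.injEq, not_and]
    omega
  have h1 : (a, b + 1) ∉ pySgrid := by simp [pySgrid, Prod.ext_iff]; omega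
  have h2 : (a, b + -1) ∉ pySgrid := by simp [pySgrid, Prod.ext_iff]; omega
  have h3 : (a + 1, b) ∉ pySgrid := by simp [pySgrid, Prod.ext_iff]; omega
  have h4 : (a + -1, b) ∉ pySgrid := by simp [pySgrid, Prod.ext_iff]; omega
  simp [A_fn, ht, List.foldl, h1, h2, h3, h4]

-- the explicit 30-entry table pyActions evaluates to
set_option maxHeartbeats 2000000 in
lemma pyActions_eq :
    pyActions = PySem.Dict.mk
      [((0, 0), []), ((0, 1), []), ((0, 2), [(1, 0)]), ((0, 3), [(1, 0)]),
       ((0, 4), []), ((0, 5), []), ((1, 0), []), ((1, 1), [(0, 1), (1, 0)]),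
       ((1, 2), []), ((1, 3), []), ((1, 4), [(0, -1), (1, 0)]), ((1, 5), []),
       ((2, 0), [(0, 1)]), ((2, 1), [(0, 1), (1, 0)]),
       ((2, 2), [(0, 1), (0, -1), (1, 0), (-1, 0)]),
       ((2, 3), [(0, 1), (0, -1), (1, 0), (-1, 0)]), ((2, 4), []),
       ((2, 5), [(0, -1)]), ((3, 0), [(0, 1)]), ((3, 1), [(0, 1), (-1, 0)]),
       ((3, 2), [(0, 1), (0, -1), (-1, 0)]), ((3, 3), [(0, 1), (0, -1), (-1, 0)]),
       ((3, 4), [(0, -1), (-1, 0)]), ((3, 5), [(0, -1)]), ((4, 0), []),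
       ((4, 1), [(-1, 0)]), ((4, 2), [(-1, 0)]), ((4, 3), [(-1, 0)]),
       ((4, 4), [(-1, 0)]), ((4, 5), [])] := by
  decide

set_option maxHeartbeats 2000000 in
lemma A_fn_alt_outside (a b : Int) (h : ¬ (0 ≤ a ∧ a ≤ 4 ∧ 0 ≤ b ∧ b ≤ 5)) :
    A_fn_alt (a, b) = [] := by
  unfold A_fn_alt
  rw [pyActions_eq]
  simp only [PySem.Dict.getD, PySem.Dict.get?_mk_cons, beq_iff_eq, Prod.mk.injEq]
  repeat rw [if_neg (by omega)]
  rfl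

-- ===== VERDICT (by name: the statement is the Claim_ definition above) =====
theorem A_fn_spec : Claim_equal_A_fn := by
  unfold Claim_equal_A_fn
  rintro ⟨a, b⟩ _
  unfold Spec_A_fn
  by_cases h : 0 ≤ a ∧ a ≤ 4 ∧ 0 ≤ b ∧ b ≤ 5
  · obtain ⟨h1, h2, h3, h4⟩ := h
    interval_cases a <;> interval_cases b <;> decide
  · rw [A_fn_outside a b h, A_fn_alt_outside a b h]
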